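-- pv_equiv track=rewrite | github.com/tushar1977/aoc-2024 | aoc_day9/main.py | find_free_spans
-- ===== SOURCE A (Python) =====
-- def find_free_spans(disk):
--     spans = []
--     start = -1
--
--     for i in range(len(disk)):
--         if disk[i] == ".":
--             if start == -1:
--                 start = i
--         else:
--             if start != -1:
--                 spans.append((start, i - 1))
--                 start = -1
--
--     if start != -1:
--         spans.append((start, len(disk) - 1))
--
--     return spans
-- ===== SOURCE B (Python) =====
-- def find_free_spans(disk):
--     spans = []
--     i = 0
--     n = len(disk)
--     while i < n:
--         j = i + 1
--         while j < n and disk[j] == disk[i]: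
--             j += 1
--         if disk[i] == ".":
--             spans.append((i, j - 1))
--         i = j
--     return spans
-- ===== Notes on version B (the rewrite author's own statement) =====
-- stated objective: alternative
-- what changed: Replaces A's per-position state machine (start=-1 sentinel plus post-loop flush) with a run-based traversal: an outer loop jumps over each maximal run of equal strings at once and emits the span directly when the run is '.'.
import Mathlib
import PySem

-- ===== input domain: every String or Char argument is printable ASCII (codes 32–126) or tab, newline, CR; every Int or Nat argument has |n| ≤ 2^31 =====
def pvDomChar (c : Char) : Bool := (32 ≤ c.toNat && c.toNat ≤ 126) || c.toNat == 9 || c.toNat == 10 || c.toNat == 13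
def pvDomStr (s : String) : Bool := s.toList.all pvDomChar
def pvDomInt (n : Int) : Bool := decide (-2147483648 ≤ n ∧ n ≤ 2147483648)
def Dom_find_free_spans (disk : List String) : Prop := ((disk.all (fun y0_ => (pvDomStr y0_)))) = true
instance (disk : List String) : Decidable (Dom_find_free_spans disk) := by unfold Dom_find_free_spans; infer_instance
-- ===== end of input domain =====

-- B replaces A's single-position state machine (start = -1 sentinel + post-loop flush)
-- by a run-based traversal that skips each maximal run of equal strings at once (objective: alternative).

-- ===== PORT A =====
-- the for-loop over range(len(disk)) with state (spans, start); the list is consumed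
-- element by element with the running index i, exactly as disk[i] is read in Python
def pvALoop (xs : List String) (i : Int) (spans : List (Int × Int)) (start : Int) :
    List (Int × Int) × Int :=
  match xs with
  | [] => (spans, start)
  | x :: rest =>
    if x == "." then
      if start == (-1 : Int) then pvALoop rest (i + 1) spans i
      else pvALoop rest (i + 1) spans start
    else
      if start == (-1 : Int) then pvALoop rest (i + 1) spans start
      else pvALoop rest (i + 1) (spans ++ [(start, i - 1)]) (-1)

def find_free_spans (disk : List String) : List (Int × Int) :=
  let (spans, start) := pvALoop disk 0 [] (-1)
  if start == (-1 : Int) then spans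
  else spans ++ [(start, (disk.length : Int) - 1)]

-- ===== PORT B =====
-- Source B's outer while: at position i the inner while advances j past the maximal run of
-- strings equal to disk[i] (takeWhile/dropWhile), emits the inclusive span if the run is '.'
def pvBGo (xs : List String) (i : Int) : List (Int × Int) :=
  match xs with
  | [] => []
  | x :: rest =>
    let run := rest.takeWhile (· == x)
    let tail := rest.dropWhile (· == x)
    let j := i + 1 + (run.length : Int)
    if x == "." then (i, j - 1) :: pvBGo tail j else pvBGo tail j
termination_by xs.length
decreasing_by
  all_goals
    simp only [List.length_cons]
    exact Nat.lt_succ_of_le (List.length_dropWhile_le _ _)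

def find_free_spans_alt (disk : List String) : List (Int × Int) := pvBGo disk 0

-- ===== PRECONDITION & SPEC =====
def Spec_find_free_spans (disk : List String) (out : List (Int × Int)) : Prop := out = find_free_spans_alt disk
instance (disk : List String) (out : List (Int × Int)) : Decidable (Spec_find_free_spans disk out) := by unfold Spec_find_free_spans; infer_instance

-- ===== CLAIM (what is proved, stated in full; the proofs are below) =====
def Claim_equal_find_free_spans : Prop := ∀ (disk : List String), Dom_find_free_spans disk → Spec_find_free_spans disk (find_free_spans disk)

-- ===== LEMMAS AND PROOFS =====

-- A's loop followed by the final flush, with the final length written as i + xs.length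
def pvF (xs : List String) (i : Int) (spans : List (Int × Int)) (start : Int) :
    List (Int × Int) :=
  let (sp, st) := pvALoop xs i spans start
  if st == (-1 : Int) then sp else sp ++ [(st, i + (xs.length : Int) - 1)]

-- B's value when a '.'-run is pending: it began at s, continues through the leading '.'s of xs
def pvPend (xs : List String) (i : Int) (s : Int) : List (Int × Int) :=
  let t := xs.takeWhile (· == ".")
  (s, i + (t.length : Int) - 1) :: pvBGo (xs.dropWhile (· == ".")) (i + (t.length : Int))

theorem pvBGo_nondot (xs : List String) (x : String) (i : Int) (hx : x ≠ ".") :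
    pvBGo (x :: xs) i = pvBGo xs (i + 1) := by
  match xs with
  | [] => simp [pvBGo, hx]
  | y :: ys =>
    by_cases hyx : y = x
    · subst hyx
      conv_lhs => rw [pvBGo]
      conv_rhs => rw [pvBGo]
      simp only [List.takeWhile_cons, List.dropWhile_cons, beq_self_eq_true, if_true,
        List.length_cons, beq_iff_eq, hx, if_false]
      congr 1
      push_cast
      ring
    · conv_lhs => rw [pvBGo]
      simp only [List.takeWhile_cons, beq_iff_eq, hyx, if_false, List.dropWhile_cons,
        List.length_nil, hx]
      norm_num

-- one loop step of A, lifted to pvF: the endpoint i + |x::rest| - 1 is rewritten as (i+1) + |rest| - 1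
theorem pvF_step (x : String) (rest : List String) (i : Int) (spans spans' : List (Int × Int))
    (start start' : Int)
    (h : pvALoop (x :: rest) i spans start = pvALoop rest (i + 1) spans' start') :
    pvF (x :: rest) i spans start = pvF rest (i + 1) spans' start' := by
  rcases hp : pvALoop rest (i + 1) spans' start' with ⟨sp, st⟩
  simp only [pvF, h, hp, List.length_cons]
  push_cast
  have e : i + ((rest.length : Int) + 1) - 1 = i + 1 + (rest.length : Int) - 1 := by ring
  rw [e]

theorem pvMain (n : Nat) (xs : List String) (hn : xs.length ≤ n) (i : Int) (hi : 0 ≤ i)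
    (spans : List (Int × Int)) :
    (pvF xs i spans (-1) = spans ++ pvBGo xs i) ∧
    (∀ s : Int, s ≠ -1 → pvF xs i spans s = spans ++ pvPend xs i s) := by
  induction n generalizing xs i spans with
  | zero =>
    have : xs = [] := List.length_eq_zero_iff.mp (Nat.le_zero.mp hn)
    subst this
    refine ⟨by simp [pvF, pvALoop, pvBGo], fun s hs => by simp [pvF, pvALoop, pvPend, pvBGo, hs]⟩
  | succ n ih =>
    match xs with
    | [] =>
      refine ⟨by simp [pvF, pvALoop, pvBGo], fun s hs => by simp [pvF, pvALoop, pvPend, pvBGo, hs]⟩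
    | x :: rest =>
      have hr : rest.length ≤ n := Nat.le_of_succ_le_succ hn
      by_cases hx : x = "."
      · subst hx
        constructor
        · -- fresh state meets a '.': start becomes i, then the pending case applies
          rw [pvF_step _ _ _ _ spans _ i (by simp [pvALoop]),
            (ih rest hr (i + 1) (by omega) spans).2 i (by omega)]
          conv_rhs => rw [pvBGo]
          simp [pvPend]
        · -- a pending '.' run continues through this '.'
          intro s hs
          rw [pvF_step _ _ _ _ spans _ s (by simp [pvALoop, hs]),
            (ih rest hr (i + 1) (by omega) spans).2 s hs]
          simp only [pvPend, List.takeWhile_cons, List.dropWhile_cons, beq_self_eq_true,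
            if_true, List.length_cons]
          push_cast
          ring_nf
      · constructor
        · -- fresh state meets a non-'.': both sides just advance
          rw [pvF_step _ _ _ _ spans _ (-1) (by simp [pvALoop, hx]),
            (ih rest hr (i + 1) (by omega) spans).1, pvBGo_nondot rest x i hx]
        · -- a pending '.' run is closed by this non-'.': emit (s, i-1) and reset
          intro s hs
          rw [pvF_step _ _ _ _ (spans ++ [(s, i - 1)]) _ (-1) (by simp [pvALoop, hx, hs]),
            (ih rest hr (i + 1) (by omega) (spans ++ [(s, i - 1)])).1]
          simp only [pvPend, List.takeWhile_cons, List.dropWhile_cons, beq_iff_eq, hx,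
            if_false, List.length_nil]
          simp [pvBGo_nondot rest x i hx]

-- ===== VERDICT (by name: the statement is the Claim_ definition above) =====
theorem find_free_spans_spec : Claim_equal_find_free_spans := by
  intro disk _
  unfold Spec_find_free_spans find_free_spans find_free_spans_alt
  have h := (pvMain disk.length disk le_rfl 0 le_rfl []).1
  simpa [pvF] using h
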